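-- pv_equiv track=rewrite | github.com/Pingviiin/plug | OP/op04_tuples/tuples.py | highest_quantity_brand
-- ===== SOURCE A (Python) =====
-- def highest_quantity_brand(phones: list[tuple]) -> str:
--     """
--     Find brand with most models.
--
--     Given a tuple containing phone brand data, return the brand with the highest total quantity of models.
--     If there is a tie, return the one that appears first in the input list.
--     """
--     name = ""
--     summa = 0
--     result_list = []
--
--
--     for i in range(0, len(phones)):
--         name = phones[i][0]
--         summa = sum(phones[i][2])
--         result = (name, summa)
--         result_list.append(result)
--
--     if result_list == []:
--         return ""
--     return max(result_list, key= lambda x: x[1])[0]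
-- ===== SOURCE B (Python) =====
-- def highest_quantity_brand(phones: list[tuple]) -> str:
--     """Single streaming pass: fuse summing and maximum selection, no intermediate list."""
--     best = ""
--     best_sum = None
--     for phone in phones:
--         s = sum(phone[2])
--         if best_sum is None or s > best_sum:
--             best, best_sum = phone[0], s
--     return best
-- ===== Notes on version B (the rewrite author's own statement) =====
-- stated objective: simpler
-- what changed: Replaced the two-phase index loop (build a (name,sum) result_list, then max with a key) by a single streaming pass that keeps the running best brand and best sum, with strict > preserving first-on-tie.
import Mathlib
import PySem

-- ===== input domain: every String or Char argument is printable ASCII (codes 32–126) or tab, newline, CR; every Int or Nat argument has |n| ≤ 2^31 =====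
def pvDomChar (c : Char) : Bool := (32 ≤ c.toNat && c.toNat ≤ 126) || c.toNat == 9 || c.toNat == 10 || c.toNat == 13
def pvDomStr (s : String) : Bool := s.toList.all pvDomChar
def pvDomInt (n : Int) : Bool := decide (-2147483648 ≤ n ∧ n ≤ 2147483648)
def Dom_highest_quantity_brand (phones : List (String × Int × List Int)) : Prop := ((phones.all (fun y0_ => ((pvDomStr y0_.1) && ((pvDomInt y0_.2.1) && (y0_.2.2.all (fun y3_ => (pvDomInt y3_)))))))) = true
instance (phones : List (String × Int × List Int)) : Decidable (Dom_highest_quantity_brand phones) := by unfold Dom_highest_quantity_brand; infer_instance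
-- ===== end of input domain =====

-- B replaces A's two phases (build a (name,sum) list, then max by key) with one streaming
-- pass keeping the running best brand and best sum; same cost, simpler.

-- ===== PORT A =====
def highest_quantity_brand (phones : List (String × Int × List Int)) : String :=
  -- for i in range(0, len(phones)): result_list.append((phones[i][0], sum(phones[i][2])))
  let result_list : List (String × Int) :=
    (PySem.List.pyRange 0 (PySem.List.len phones) 1).foldl
      (fun acc i =>
        let p := PySem.List.pyGetD phones i ("", (0 : Int), ([] : List Int))
        acc ++ [(p.1, p.2.2.foldl (· + ·) 0)]) []
  if result_list = [] then ""
  else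
    match PySem.List.max? result_list (fun x => x.2) with
    | some m => m.1
    | none => ""

-- ===== PORT B =====
def highest_quantity_brand_alt (phones : List (String × Int × List Int)) : String :=
  (phones.foldl
    (fun (acc : String × Option Int) phone =>
      let s := phone.2.2.foldl (· + ·) 0
      match acc.2 with
      | none => (phone.1, some s)
      | some b => if s > b then (phone.1, some s) else acc)
    ("", none)).1

-- ===== PRECONDITION & SPEC =====
def Spec_highest_quantity_brand (phones : List (String × Int × List Int)) (out : String) : Prop := out = highest_quantity_brand_alt phones
instance (phones : List (String × Int × List Int)) (out : String) : Decidable (Spec_highest_quantity_brand phones out) := by unfold Spec_highest_quantity_brand; infer_instance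

-- ===== CLAIM (what is proved, stated in full; the proofs are below) =====
def Claim_equal_highest_quantity_brand : Prop := ∀ (phones : List (String × Int × List Int)), Dom_highest_quantity_brand phones → Spec_highest_quantity_brand phones (highest_quantity_brand phones)

-- ===== LEMMAS AND PROOFS =====

-- the (name, sum) projection both programs use
def pvF (p : String × Int × List Int) : String × Int := (p.1, p.2.2.foldl (· + ·) 0)

-- the accumulator step of Python's max(…, key=λx. x[1]) (first maximum kept)
def pvStep (acc : Option (String × Int)) (x : String × Int) : Option (String × Int) :=
  match acc with
  | none => some x
  | some m => if m.2 < x.2 then some x else some m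

-- B's loop state viewed as A's max?-accumulator
def pvState (acc : Option (String × Int)) : String × Option Int :=
  match acc with
  | none => ("", none)
  | some (b, s) => (b, some s)

lemma pv_max?_eq_foldl (l : List (String × Int)) :
    PySem.List.max? l (fun p => p.2) = l.foldl pvStep none := by
  simp only [PySem.List.max?]
  congr 1
  funext acc y
  cases acc <;> rfl

lemma pv_loop_eq (l : List (String × Int × List Int)) :
    ∀ acc : Option (String × Int),
      l.foldl
        (fun (acc : String × Option Int) phone =>
          let s := phone.2.2.foldl (· + ·) 0
          match acc.2 with
          | none => (phone.1, some s)
          | some b => if s > b then (phone.1, some s) else acc)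
        (pvState acc)
      = pvState ((l.map pvF).foldl pvStep acc) := by
  induction l with
  | nil => intro acc; rfl
  | cons p t ih =>
    intro acc
    cases acc with
    | none => simpa [pvStep] using ih (some (pvF p))
    | some m =>
      obtain ⟨b, s⟩ := m
      by_cases h : s < p.2.2.foldl (· + ·) 0
      · simpa [pvState, pvStep, pvF, h, gt_iff_lt] using ih (some (pvF p))
      · simpa [pvState, pvStep, pvF, h, gt_iff_lt] using ih (some (b, s))

lemma pv_foldl_append (l : List (String × Int × List Int)) :
    ∀ init : List (String × Int),
      l.foldl (fun acc p => acc ++ [pvF p]) init = init ++ l.map pvF := by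
  induction l with
  | nil => intro init; simp
  | cons p t ih => intro init; simp [ih]

lemma pv_foldl_some_ne_none (l : List (String × Int)) :
    ∀ a : String × Int, l.foldl pvStep (some a) ≠ none := by
  induction l with
  | nil => intro a; simp
  | cons y t ih =>
    intro a
    by_cases h : a.2 < y.2 <;> simp [pvStep, h, ih]

lemma pv_result_list (phones : List (String × Int × List Int)) :
    (PySem.List.pyRange 0 (PySem.List.len phones) 1).foldl
      (fun acc i =>
        let p := PySem.List.pyGetD phones i ("", (0 : Int), ([] : List Int))
        acc ++ [(p.1, p.2.2.foldl (· + ·) 0)]) []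
    = phones.map pvF := by
  show (PySem.List.pyRange 0 (PySem.List.len phones) 1).foldl
      (fun acc i =>
        (fun (acc : List (String × Int)) p => acc ++ [pvF p]) acc
          (PySem.List.pyGetD phones i ("", (0 : Int), ([] : List Int)))) []
    = phones.map pvF
  rw [PySem.List.foldl_pyRange_zero_pyGetD phones ("", (0 : Int), ([] : List Int))
      (fun (acc : List (String × Int)) p => acc ++ [pvF p]) []]
  simpa using pv_foldl_append phones []

-- ===== VERDICT (by name: the statement is the Claim_ definition above) =====
theorem highest_quantity_brand_spec : Claim_equal_highest_quantity_brand := by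
  intro phones _
  unfold Spec_highest_quantity_brand highest_quantity_brand highest_quantity_brand_alt
  rw [pv_result_list]
  have hB := pv_loop_eq phones none
  simp only [pvState] at hB
  rw [hB]
  cases hmap : phones.map pvF with
  | nil => rfl
  | cons x t =>
    simp only [if_neg (List.cons_ne_nil x t), pv_max?_eq_foldl, List.foldl_cons,
      show pvStep none x = some x from rfl]
    rcases hfold : t.foldl pvStep (some x) with _ | m
    · exact absurd hfold (pv_foldl_some_ne_none t x)
    · rfl
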